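-- pv_equiv track=rewrite | github.com/HaCTang/RnaPSP | RNA_classifier.py | is_repeat_or_poly_rna
-- ===== SOURCE A (Python) =====
-- def is_repeat_or_poly_rna(sequence: str) -> str:
--     # Convert the sequence to uppercase to avoid case sensitivity
--     sequence = sequence.upper()
--
--     # Check if the sequence is polyRNA (same nucleotide repeated)
--     if sequence == sequence[0] * len(sequence) and len(sequence) > 40:
--         return "PolyRNA"
--
--     # Check if the sequence is a repeat RNA
--     for i in range(1, len(sequence)):
--         repeat_unit = sequence[:i]
--         if (
--             len(sequence) % len(repeat_unit) == 0 and  # Sequence length is divisible by repeat unit length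
--             (len(sequence) // len(repeat_unit)) >= 4 and  # Repeat unit appears at least 4 times
--             repeat_unit * (len(sequence) // len(repeat_unit)) == sequence and  # Repeat unit matches the entire sequence
--             len(sequence) > 20  # Sequence is longer than 20 nucleotides
--         ):
--             return "Repeat RNA"
--
--     return "Neither"
-- ===== SOURCE B (Python) =====
-- def is_repeat_or_poly_rna(sequence: str) -> str:
--     s = sequence.upper()
--     n = len(s)
--     # Smallest rotation period of s: the least p >= 1 such that s occurs in s+s
--     # at position p (always <= n).  s is a tiling of some unit of length d
--     # (d | n, d < n) iff p | n with p < n, and the smallest tiling unit then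
--     # has length p; so "some unit repeats >= 4 times" is exactly 4*p <= n,
--     # and "all characters equal" is exactly p == 1.
--     p = (s + s).find(s, 1)
--     if n > 40 and p == 1:
--         return "PolyRNA"
--     if n > 20 and 4 * p <= n:
--         return "Repeat RNA"
--     return "Neither"
-- ===== Notes on version B (the rewrite author's own statement) =====
-- stated objective: faster
-- what changed: B has no loop over candidate unit lengths at all: it computes the smallest rotation period p = (s+s).find(s, 1) with one linear-time substring search and classifies by p alone (PolyRNA iff n>40 and p==1; Repeat RNA iff n>20 and 4*p<=n), correct because s is a tiling of a unit of length d (d|n, d<n) iff the smallest rotation period p divides n and d is a multiple of p.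
import Mathlib
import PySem

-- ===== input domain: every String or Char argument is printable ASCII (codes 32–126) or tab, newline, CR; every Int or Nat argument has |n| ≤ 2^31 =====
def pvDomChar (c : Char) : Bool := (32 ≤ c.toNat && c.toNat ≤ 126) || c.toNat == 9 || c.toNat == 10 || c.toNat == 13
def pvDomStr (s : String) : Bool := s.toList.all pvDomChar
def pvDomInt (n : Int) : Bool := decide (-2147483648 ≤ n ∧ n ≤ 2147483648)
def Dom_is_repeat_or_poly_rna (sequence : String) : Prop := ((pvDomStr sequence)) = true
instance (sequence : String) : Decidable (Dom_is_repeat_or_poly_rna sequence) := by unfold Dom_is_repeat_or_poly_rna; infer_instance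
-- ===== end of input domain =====

-- B replaces A's scan over candidate unit lengths by ONE substring search: the smallest
-- rotation period p = (s+s).find(s, 1) decides both classes (measurably faster in a timing run).

-- ===== PORT A =====
-- A's inner loop: for i in range(1, len(sequence)): … return "Repeat RNA" on first hit, else "Neither"
def pvALoop (cs : List Char) (is : List Int) : String :=
  match is with
  | [] => "Neither"
  | i :: rest =>
    let u := PySem.List.slice cs none (some i)
    if PySem.Int.mod (cs.length : Int) (u.length : Int) = 0 ∧
       4 ≤ PySem.Int.floordiv (cs.length : Int) (u.length : Int) ∧
       PySem.List.pyRepeat u (PySem.Int.floordiv (cs.length : Int) (u.length : Int)) = cs ∧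
       20 < cs.length
    then "Repeat RNA" else pvALoop cs rest

def is_repeat_or_poly_rna (sequence : String) : String :=
  let cs := (PySem.Str.upper sequence).toList
  match PySem.List.pyGet? cs 0 with
  | none => ""  -- Python raises IndexError here (empty sequence); excluded by Pre_
  | some c =>
    if cs = PySem.List.pyRepeat [c] (cs.length : Int) ∧ 40 < cs.length then "PolyRNA"
    else pvALoop cs (PySem.List.pyRange 1 (cs.length : Int) 1)

-- ===== PORT B =====
-- B: p = (s + s).find(s, 1); PolyRNA iff n > 40 and p == 1; Repeat RNA iff n > 20 and 4*p <= n
def is_repeat_or_poly_rna_alt (sequence : String) : String :=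
  let cs := (PySem.Str.upper sequence).toList
  let n := cs.length
  let p := PySem.Chars.findFrom (cs ++ cs) cs 1 none
  if 40 < n ∧ p = 1 then "PolyRNA"
  else if 20 < n ∧ 4 * p ≤ (n : Int) then "Repeat RNA"
  else "Neither"

-- ===== PRECONDITION & SPEC =====
-- Pre_ excludes only the empty string, on which A raises IndexError (sequence[0]).
def Pre_is_repeat_or_poly_rna (sequence : String) : Prop := sequence ≠ ""
instance (sequence : String) : Decidable (Pre_is_repeat_or_poly_rna sequence) := by
  unfold Pre_is_repeat_or_poly_rna; infer_instance
def pvWitness_is_repeat_or_poly_rna : String := "ACGU"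

def Spec_is_repeat_or_poly_rna (sequence : String) (out : String) : Prop := out = is_repeat_or_poly_rna_alt sequence
instance (sequence : String) (out : String) : Decidable (Spec_is_repeat_or_poly_rna sequence out) := by unfold Spec_is_repeat_or_poly_rna; infer_instance

-- ===== CLAIM (what is proved, stated in full; the proofs are below) =====
def Claim_equal_is_repeat_or_poly_rna : Prop := ∀ (sequence : String), Dom_is_repeat_or_poly_rna sequence → Pre_is_repeat_or_poly_rna sequence → Spec_is_repeat_or_poly_rna sequence (is_repeat_or_poly_rna sequence)

-- ===== LEMMAS AND PROOFS =====

theorem pv_len_flatten_rep (u : List Char) (q : Nat) : (List.replicate q u).flatten.length = q * u.length := by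
  induction q with
  | zero => simp
  | succ q ih => simp [List.replicate_succ, ih]; ring

-- tiling is equivalent to the shift-by-k self-overlap (k the unit length); both directions below
theorem pv_shift_to_tile (k : Nat) : ∀ (q : Nat) (cs : List Char),
    cs.length = q * k → cs.drop k = cs.take (cs.length - k) →
    (List.replicate q (cs.take k)).flatten = cs := by
  intro q
  induction q with
  | zero => intro cs hl _; simp_all
  | succ q ih =>
    intro cs hl hs
    cases q with
    | zero =>
      have : cs.length = k := by omega
      simp [List.replicate, List.take_of_length_le, this.le]
    | succ q' =>
      have hmul : (q'+1+1) * k = (q'+1) * k + k := by ring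
      have hmul2 : (q'+1) * k = q' * k + k := by ring
      have hTlen : (cs.drop k).length = (q'+1) * k := by simp [hl]; omega
      have htakeT : (cs.drop k).take k = cs.take k := by
        rw [hs, List.take_take]
        congr 1; omega
      have hshiftT : (cs.drop k).drop k = (cs.drop k).take ((cs.drop k).length - k) := by
        conv_lhs => rw [hs]
        rw [List.drop_take]
        congr 1
        simp
      have hmain := ih (cs.drop k) hTlen hshiftT
      rw [htakeT] at hmain
      calc (List.replicate (q'+1+1) (cs.take k)).flatten
          = cs.take k ++ (List.replicate (q'+1) (cs.take k)).flatten := by simp [List.replicate_succ]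
        _ = cs.take k ++ cs.drop k := by rw [hmain]
        _ = cs := List.take_append_drop k cs

-- "cs occurs in cs++cs at position k" (k ≤ n) is exactly "cs equals its rotation by k"
theorem pv_occ_iff_rotate (cs : List Char) (k : Nat) (hk : k ≤ cs.length) :
    cs <+: (cs ++ cs).drop k ↔ cs.rotate k = cs := by
  rw [List.drop_append_of_le_length hk, List.rotate_eq_drop_append_take hk]
  constructor
  · intro h
    have h' := List.prefix_iff_eq_take.mp h
    rw [List.take_append, List.take_of_length_le (by simp), List.length_drop,
        show cs.length - (cs.length - k) = k from by omega] at h'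
    exact h'.symm
  · intro h
    refine ⟨cs.drop k, ?_⟩
    have h2 : cs.take k ++ cs.drop k = cs.drop k ++ cs.take k := by
      rw [List.take_append_drop, h]
    calc cs ++ cs.drop k = (cs.drop k ++ cs.take k) ++ cs.drop k := by rw [h]
      _ = cs.drop k ++ (cs.take k ++ cs.drop k) := by simp [List.append_assoc]
      _ = cs.drop k ++ cs := by rw [List.take_append_drop]

theorem pv_rotate_mul (cs : List Char) (p : Nat) (h : cs.rotate p = cs) (m : Nat) :
    cs.rotate (p * m) = cs := by
  induction m with
  | zero => simp
  | succ m ih =>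
    have e : p * (m + 1) = p * m + p := by ring
    rw [e, ← List.rotate_rotate, ih, h]

-- rotation by k, with k dividing the length, gives the tiling A's loop tests
theorem pv_rotate_to_tile (cs : List Char) (k : Nat) (_hk1 : 1 ≤ k) (hdvd : k ∣ cs.length)
    (h : cs.rotate k = cs) :
    (List.replicate (cs.length / k) (cs.take k)).flatten = cs := by
  by_cases h0 : cs.length = 0
  · have : cs = [] := List.eq_nil_of_length_eq_zero h0
    simp [this]
  · have hkn : k ≤ cs.length := Nat.le_of_dvd (by omega) hdvd
    rw [List.rotate_eq_drop_append_take hkn] at h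
    have hX := List.take_left (l₁ := cs.drop k) (l₂ := cs.take k)
    rw [h, List.length_drop] at hX
    exact pv_shift_to_tile k (cs.length / k) cs (by rw [Nat.div_mul_cancel hdvd]) hX.symm

-- a tiling by q ≥ 1 copies of the length-k prefix gives the rotation by k
theorem pv_tile_to_rotate (cs : List Char) (k q : Nat) (hq : 1 ≤ q)
    (hlen : (cs.take k).length = k)
    (h : (List.replicate q (cs.take k)).flatten = cs) :
    cs.rotate k = cs := by
  have hkn : k ≤ cs.length := by
    rw [← h, pv_len_flatten_rep, hlen]
    calc k = 1 * k := by ring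
      _ ≤ q * k := Nat.mul_le_mul_right k hq
  obtain ⟨q', rfl⟩ : ∃ q', q = q' + 1 := ⟨q - 1, by omega⟩
  have h1 : cs = cs.take k ++ (List.replicate q' (cs.take k)).flatten := by
    conv_lhs => rw [← h]
    simp [List.replicate_succ]
  have hdrop : cs.drop k = (List.replicate q' (cs.take k)).flatten := by
    conv_lhs => rw [h1]
    exact List.drop_left' hlen
  have key : cs.drop k ++ cs.take k = cs := by
    rw [hdrop, ← List.flatten_concat, ← List.replicate_succ']
    exact h
  rw [List.rotate_eq_drop_append_take hkn]
  exact key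

-- the B-side search value: p := (cs++cs).find(cs, 1) is the LEAST rotation period of cs
theorem pv_find_spec (cs : List Char) (hne : cs ≠ []) :
    ∃ p : Nat, PySem.Chars.findFrom (cs ++ cs) cs 1 none = (p : Int) ∧
      1 ≤ p ∧ p ≤ cs.length ∧ cs.rotate p = cs ∧
      ∀ j, 1 ≤ j → j < p → ¬ cs.rotate j = cs := by
  have hn1 : 1 ≤ cs.length := List.length_pos_of_ne_nil hne
  have hk : 1 ≤ (cs ++ cs).length := by simp; omega
  have hocc_n : cs <+: (cs ++ cs).drop cs.length := by
    rw [List.drop_append_of_le_length le_rfl]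
    simp
  rw [show (1 : Int) = ((1 : Nat) : Int) from rfl]
  have hne1 : PySem.Chars.findFrom (cs ++ cs) cs ((1 : Nat) : Int) none ≠ -1 := by
    intro heq
    apply (PySem.Chars.findFrom_natCast_eq_neg_one_iff (cs ++ cs) cs 1 hk).mp heq
    rw [List.drop_append_of_le_length hn1]
    exact (List.suffix_append (cs.drop 1) cs).isInfix
  obtain ⟨hge, hpre, hmin⟩ := PySem.Chars.findFrom_natCast_spec (cs ++ cs) cs 1 hk hne1
  set f := PySem.Chars.findFrom (cs ++ cs) cs ((1 : Nat) : Int) none with hf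
  have hge0 : (0 : Int) ≤ f := le_trans (by norm_num) hge
  refine ⟨f.toNat, (Int.toNat_of_nonneg hge0).symm, ?_, ?_, ?_, ?_⟩
  · exact_mod_cast (Int.toNat_of_nonneg hge0) ▸ hge
  · by_contra hgt
    push_neg at hgt
    exact hmin cs.length hn1 hgt hocc_n
  · have hple : f.toNat ≤ cs.length := by
      by_contra hgt
      push_neg at hgt
      exact hmin cs.length hn1 hgt hocc_n
    exact (pv_occ_iff_rotate cs f.toNat hple).mp hpre
  · intro j hj1 hjp hrot
    have hjn : j ≤ cs.length := by
      have : f.toNat ≤ cs.length := by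
        by_contra hgt
        push_neg at hgt
        exact hmin cs.length hn1 hgt hocc_n
      omega
    exact hmin j hj1 hjp ((pv_occ_iff_rotate cs j hjn).mpr hrot)

-- A's loop, summarised as an existential over the scanned indices (first hit ⇒ "Repeat RNA")
theorem pvALoop_eq (cs : List Char) (is : List Int) :
    pvALoop cs is = if (∃ i ∈ is,
        PySem.Int.mod (cs.length : Int) ((PySem.List.slice cs none (some i)).length : Int) = 0 ∧
        4 ≤ PySem.Int.floordiv (cs.length : Int) ((PySem.List.slice cs none (some i)).length : Int) ∧
        PySem.List.pyRepeat (PySem.List.slice cs none (some i))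
          (PySem.Int.floordiv (cs.length : Int) ((PySem.List.slice cs none (some i)).length : Int)) = cs ∧
        20 < cs.length) then "Repeat RNA" else "Neither" := by
  induction is with
  | nil => simp [pvALoop]
  | cons i rest ih =>
    rw [show pvALoop cs (i :: rest)
        = (if PySem.Int.mod (cs.length : Int) ((PySem.List.slice cs none (some i)).length : Int) = 0 ∧
              4 ≤ PySem.Int.floordiv (cs.length : Int) ((PySem.List.slice cs none (some i)).length : Int) ∧
              PySem.List.pyRepeat (PySem.List.slice cs none (some i))
                (PySem.Int.floordiv (cs.length : Int) ((PySem.List.slice cs none (some i)).length : Int)) = cs ∧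
              20 < cs.length
           then "Repeat RNA" else pvALoop cs rest) from rfl]
    by_cases h : PySem.Int.mod (cs.length : Int) ((PySem.List.slice cs none (some i)).length : Int) = 0 ∧
        4 ≤ PySem.Int.floordiv (cs.length : Int) ((PySem.List.slice cs none (some i)).length : Int) ∧
        PySem.List.pyRepeat (PySem.List.slice cs none (some i))
          (PySem.Int.floordiv (cs.length : Int) ((PySem.List.slice cs none (some i)).length : Int)) = cs ∧
        20 < cs.length
    · rw [if_pos h, if_pos ⟨i, List.mem_cons_self, h⟩]
    · rw [if_neg h, ih]
      refine if_congr ?_ rfl rfl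
      rw [List.exists_mem_cons_iff]
      exact (or_iff_right h).symm

-- A's existential over prefix lengths holds iff 20 < n and 4 * (smallest rotation period) ≤ n
theorem pv_exists_iff_period (cs : List Char) (p : Nat) (hp1 : 1 ≤ p) (hpn : p ≤ cs.length)
    (hrot : cs.rotate p = cs) (hmin : ∀ j, 1 ≤ j → j < p → ¬ cs.rotate j = cs) :
    (∃ i ∈ PySem.List.pyRange 1 (cs.length : Int) 1,
        PySem.Int.mod (cs.length : Int) ((PySem.List.slice cs none (some i)).length : Int) = 0 ∧
        4 ≤ PySem.Int.floordiv (cs.length : Int) ((PySem.List.slice cs none (some i)).length : Int) ∧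
        PySem.List.pyRepeat (PySem.List.slice cs none (some i))
          (PySem.Int.floordiv (cs.length : Int) ((PySem.List.slice cs none (some i)).length : Int)) = cs ∧
        20 < cs.length)
    ↔ (20 < cs.length ∧ 4 * p ≤ cs.length) := by
  set n := cs.length with hn
  constructor
  · rintro ⟨i, hmem, hc⟩
    rw [PySem.List.mem_pyRange_one] at hmem
    obtain ⟨h1, h2⟩ := hmem
    obtain ⟨k, rfl⟩ : ∃ k : Nat, i = (k : Int) := ⟨i.toNat, (Int.toNat_of_nonneg (by omega)).symm⟩
    have hk1 : 1 ≤ k := by exact_mod_cast h1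
    have hkn : k < n := by exact_mod_cast h2
    rw [PySem.List.slice_to_natCast] at hc
    have hlen : (cs.take k).length = k := by simp; omega
    rw [hlen] at hc
    obtain ⟨hmod, hdiv4, htile, h20⟩ := hc
    have hdvd : k ∣ n := by
      have := (PySem.Int.mod_eq_zero_iff_dvd (n : Int) (k : Int)).mp hmod
      exact_mod_cast this
    rw [PySem.Int.floordiv_natCast] at hdiv4
    have hdiv4' : 4 ≤ n / k := by exact_mod_cast hdiv4
    have htile' : (List.replicate (n / k) (cs.take k)).flatten = cs := by
      rw [PySem.Int.floordiv_natCast] at htile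
      simpa [PySem.List.pyRepeat] using htile
    have hrotk : cs.rotate k = cs :=
      pv_tile_to_rotate cs k (n / k) (by omega) hlen htile'
    have hpk : p ≤ k := by
      by_contra hgt
      push_neg at hgt
      exact hmin k hk1 hgt hrotk
    have h4k : 4 * k ≤ n := by
      have := (Nat.le_div_iff_mul_le (by omega : 0 < k)).mp hdiv4'
      omega
    exact ⟨h20, by omega⟩
  · rintro ⟨h20, h4p⟩
    have hpn' : p < n := by omega
    have hdvd : p ∣ n := by
      by_contra hnd
      have hr : n % p ≠ 0 := fun h => hnd (Nat.dvd_of_mod_eq_zero h)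
      have hr1 : 1 ≤ n % p := by omega
      have hrp : n % p < p := Nat.mod_lt _ (by omega)
      apply hmin (n % p) hr1 hrp
      have h1 : cs.rotate (p * (n / p)) = cs := pv_rotate_mul cs p hrot (n / p)
      have h2 : cs.rotate (p * (n / p) + n % p) = cs := by
        rw [show p * (n / p) + n % p = n from Nat.div_add_mod n p, hn]
        exact List.rotate_length cs
      rw [← List.rotate_rotate, h1] at h2
      exact h2
    have htile := pv_rotate_to_tile cs p hp1 hdvd hrot
    have hdiv4 : 4 ≤ n / p := (Nat.le_div_iff_mul_le (by omega : 0 < p)).mpr (by omega)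
    refine ⟨(p : Int), ?_, ?_⟩
    · rw [PySem.List.mem_pyRange_one]
      exact ⟨by exact_mod_cast hp1, by exact_mod_cast hpn'⟩
    · rw [PySem.List.slice_to_natCast]
      have hlen : (cs.take p).length = p := by simp; omega
      rw [hlen]
      refine ⟨(PySem.Int.mod_eq_zero_iff_dvd _ _).mpr (by exact_mod_cast hdvd), ?_, ?_, h20⟩
      · rw [PySem.Int.floordiv_natCast]; exact_mod_cast hdiv4
      · rw [PySem.Int.floordiv_natCast]
        simpa [PySem.List.pyRepeat] using htile

-- "all characters equal the first" iff the smallest rotation period is 1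
theorem pv_poly_iff_period (c : Char) (l : List Char) (p : Nat) (hp1 : 1 ≤ p)
    (hrot : (c :: l).rotate p = c :: l) (hmin : ∀ j, 1 ≤ j → j < p → ¬ (c :: l).rotate j = c :: l) :
    (c :: l) = List.replicate (c :: l).length c ↔ p = 1 := by
  have hn1 : 1 ≤ (c :: l).length := by simp
  have htk : (c :: l).take 1 = [c] := rfl
  constructor
  · intro h
    have htile : (List.replicate (c :: l).length ((c :: l).take 1)).flatten = c :: l := by
      rw [htk]
      conv_rhs => rw [h]
      simp [List.flatten_replicate_singleton]
    have hrot1 : (c :: l).rotate 1 = c :: l :=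
      pv_tile_to_rotate (c :: l) 1 (c :: l).length (by omega) (by rw [htk]; rfl) htile
    by_contra hne
    exact hmin 1 le_rfl (by omega) hrot1
  · intro h
    subst h
    have htile := pv_rotate_to_tile (c :: l) 1 le_rfl (one_dvd _) hrot
    rw [Nat.div_one, htk] at htile
    conv_lhs => rw [← htile]
    simp [List.flatten_replicate_singleton]

theorem pv_pyGet_cons (c : Char) (l : List Char) : PySem.List.pyGet? (c :: l) 0 = some c := by
  simp [PySem.List.pyGet?, PySem.List.pyIdx?]

-- ===== VERDICT (by name: the statement is the Claim_ definition above) =====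
theorem is_repeat_or_poly_rna_spec : Claim_equal_is_repeat_or_poly_rna := by
  intro sequence _ hpre
  unfold Spec_is_repeat_or_poly_rna
  have hne : (PySem.Str.upper sequence).toList ≠ [] := by
    rw [PySem.Str.toList_upper]
    simp only [PySem.Chars.upper, ne_eq, List.map_eq_nil_iff]
    intro h
    exact hpre (by rw [← String.ofList_toList (s := sequence), h])
  obtain ⟨c, l, hcl⟩ := List.exists_cons_of_ne_nil hne
  unfold is_repeat_or_poly_rna is_repeat_or_poly_rna_alt
  simp only [hcl, pv_pyGet_cons]
  obtain ⟨p, hfp, hp1, hpn, hrot, hmin⟩ := pv_find_spec (c :: l) (by simp)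
  rw [hfp]
  have epoly : ((c :: l) = PySem.List.pyRepeat [c] ((c :: l).length : Int) ∧ 40 < (c :: l).length)
      ↔ (40 < (c :: l).length ∧ (p : Int) = 1) := by
    rw [PySem.List.pyRepeat_singleton, Int.toNat_natCast]
    rw [pv_poly_iff_period c l p hp1 hrot hmin,
        show ((p : Int) = 1 ↔ p = 1) from by omega]
    exact and_comm
  rw [if_congr epoly rfl rfl]
  by_cases hpoly : 40 < (c :: l).length ∧ (p : Int) = 1
  · rw [if_pos hpoly, if_pos hpoly]
  · rw [if_neg hpoly, if_neg hpoly]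
    rw [pvALoop_eq]
    refine if_congr ?_ rfl rfl
    rw [pv_exists_iff_period (c :: l) p hp1 hpn hrot hmin]
    constructor
    · rintro ⟨h20, h4p⟩
      refine ⟨h20, ?_⟩
      omega
    · rintro ⟨h20, h4p⟩
      refine ⟨h20, ?_⟩
      omega
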